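/- GENERATED by farm/mkstatement.py from design/units.tsv (unit `vorbis_decode_packet_rest.9`) and the assertions of Vorbis/Spec/PacketRest.lean — do not edit.
   THE STATEMENT of the proof unit `vorbis_decode_packet_rest.9`: segment 9 of `vorbis_decode_packet_rest` (68 instructions; entries 0x111559;
   exits 0x1116af; ranges 0x111559-0x1116aa)
   takes each of its entry assertions to one of its exit assertions (`Vorbis.Spec.vorbis_decode_packet_rest.Seg9`), given the contracts of its callees.
   What the names mean: Vorbis/Spec/Basic.lean (the shared hypotheses), Vorbis/Spec/PacketRest.lean (the assertions). The theorem to prove: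
   `theorem vorbis_decode_packet_rest_9_ok : Vorbis.Spec.vorbis_decode_packet_rest_9.Statement`. -/
import Vorbis.Spec.DecodeResidue
import Vorbis.Spec.PacketRest
namespace Vorbis.Spec.vorbis_decode_packet_rest_9
open X86 X86.User Asan

/-- The statement of unit `vorbis_decode_packet_rest.9`. -/
def Statement : Prop :=
  ∀ (Lay : Layout) (_hLay : Lay.hi = 0x1000000) (μ : Microarch) (_hμ : UserX.MicroOK μ) (u₀ : State)
    (_hcode : HasCodeNat Lay u₀ Vorbis.L.vorbis_decode_packet_rest.entry Vorbis.Code.code_vorbis_decode_packet_rest.nat Vorbis.L.vorbis_decode_packet_rest.size)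
    (_h_asan_store1_noabort : Asan.SmallCheck Lay μ Vorbis.WayInv (Vorbis.CodeOK u₀) [.rax, .rdx] 1 Vorbis.L.__asan_store1_noabort.entry)
    (_h_asan_load8_noabort : Asan.SmallCheck Lay μ Vorbis.WayInv (Vorbis.CodeOK u₀) [.rax, .rcx, .rdx] 8 Vorbis.L.__asan_load8_noabort.entry)
    (_h_asan_store8_noabort : Asan.SmallCheck Lay μ Vorbis.WayInv (Vorbis.CodeOK u₀) [.rax, .rcx, .rdx] 8 Vorbis.L.__asan_store8_noabort.entry)
    (_h_asan_load4_noabort : Asan.SmallCheck Lay μ Vorbis.WayInv (Vorbis.CodeOK u₀) [.rax, .rcx, .rdx] 4 Vorbis.L.__asan_load4_noabort.entry)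
    (_h_asan_load1_noabort : Asan.SmallCheck Lay μ Vorbis.WayInv (Vorbis.CodeOK u₀) [.rax, .rdx] 1 Vorbis.L.__asan_load1_noabort.entry)
    (_h_decode_residue : ∀ (len : Nat) (A : Arena) (others : List Obj) (frames : List (Nat × FrameLayout)) (stored room : Int) (ysz : Nat → Nat), Calls Lay μ Vorbis.WayInv (Vorbis.conv u₀) Vorbis.L.decode_residue.entry (Vorbis.Spec.decode_residue.spec len A others frames stored room ysz)),
    Vorbis.Spec.vorbis_decode_packet_rest.Seg9 Lay μ u₀

end Vorbis.Spec.vorbis_decode_packet_rest_9
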